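-- pv_equiv track=rewrite | github.com/timmermansjoy/Frequency-analysis | Freq.py | possiblecombos
-- ===== SOURCE A (Python) =====
-- def alphaArr():
--     # create a array list of the alphabeth
--     arr = [None] * 26
--     arr[:] = [chr(i + ord("a")) for i in range(26)]
--     return arr
--
-- def letterfreq(text):
--     # Count how often letters are in a text
--     alpha = alphaArr()
--     frequency = [0] * 26
--     for i in text:
--         if "a" <= i <= "z":
--             index = alpha.index(i)
--             frequency[index] += 1
--     return frequency
--
-- def possiblecombos(text):
--     # Het gebruik van meest voorkomende letters omvormen naar de meest gebruikte letters
--     freq = letterfreq(text)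
--     pos = 0
--     for i in range(len(freq)):
--         counter = 0
--         for j in range(len(freq)):
--             if freq[i] == freq[j] and freq[i] != 0:
--                 counter += 1
--         if counter > 1:
--             pos += 1
--     return pos
-- ===== SOURCE B (Python) =====
-- def possiblecombos(text):
--     # single pass: direct frequency table, then group equal nonzero counts once
--     freq = [0] * 26
--     for ch in text:
--         if "a" <= ch <= "z":
--             freq[ord(ch) - 97] += 1
--     counts = {}
--     for f in freq:
--         if f != 0:
--             counts[f] = counts.get(f, 0) + 1
--     return sum(c for c in counts.values() if c > 1)
-- ===== Notes on version B (the rewrite author's own statement) =====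
-- stated objective: faster
-- what changed: Replaces the O(26^2) pairwise frequency scan (and the per-character alpha.index search) with a direct ord-arithmetic frequency table plus one grouping pass over a dict mapping each nonzero frequency to its group size, summing group sizes greater than 1.
import Mathlib
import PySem

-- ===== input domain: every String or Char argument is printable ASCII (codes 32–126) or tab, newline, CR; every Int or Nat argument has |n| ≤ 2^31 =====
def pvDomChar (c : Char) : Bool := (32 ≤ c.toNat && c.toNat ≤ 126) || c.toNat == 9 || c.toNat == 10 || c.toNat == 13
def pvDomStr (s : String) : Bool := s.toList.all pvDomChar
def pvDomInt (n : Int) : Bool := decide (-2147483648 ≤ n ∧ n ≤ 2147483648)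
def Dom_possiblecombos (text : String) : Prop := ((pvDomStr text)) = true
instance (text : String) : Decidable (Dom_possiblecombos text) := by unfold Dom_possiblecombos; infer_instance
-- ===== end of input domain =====

-- B replaces A's pairwise 26×26 scan and per-character alpha.index search by a direct
-- frequency table and one grouping pass over a counter dict (same return value everywhere).

-- ===== PORT A =====
-- arr = [None]*26; arr[:] = [chr(i + ord("a")) for i in range(26)]  (final value is the comprehension)
def alphaArrPort : List Char :=
  (PySem.List.pyRange 0 26 1).map (fun i => Char.ofNat (i + 97).toNat)

def letterfreqPort (text : String) : List Int :=
  text.toList.foldl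
    (fun frequency i =>
      if 'a' ≤ i ∧ i ≤ 'z' then
        -- alpha.index(i): never raises here since i ∈ alpha under the guard; getD 0 is unreachable
        let index : Nat := (PySem.List.index? alphaArrPort i).getD 0
        PySem.List.pySetD frequency (index : Int)
          (PySem.List.pyGetD frequency (index : Int) 0 + 1)
      else frequency)
    (List.replicate 26 0)

def possiblecombos (text : String) : Int :=
  let freq := letterfreqPort text
  (PySem.List.pyRange 0 (freq.length : Int) 1).foldl
    (fun pos i =>
      if ((PySem.List.pyRange 0 (freq.length : Int) 1).foldl
            (fun counter j =>
              if PySem.List.pyGetD freq i 0 = PySem.List.pyGetD freq j 0 ∧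
                 PySem.List.pyGetD freq i 0 ≠ 0
              then counter + 1 else counter) (0 : Int)) > 1
      then pos + 1 else pos)
    0

-- ===== PORT B =====
def possiblecombos_alt (text : String) : Int :=
  let freq := text.toList.foldl
    (fun freq ch =>
      if 'a' ≤ ch ∧ ch ≤ 'z' then
        PySem.List.pySetD freq ((ch.toNat : Int) - 97)
          (PySem.List.pyGetD freq ((ch.toNat : Int) - 97) 0 + 1)
      else freq)
    (List.replicate 26 (0 : Int))
  let counts := freq.foldl
    (fun counts f => if f ≠ 0 then counts.insert f (counts.getD f 0 + 1) else counts)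
    (PySem.Dict.empty)
  (counts.values.filter (fun c => decide (c > 1))).sum

-- ===== PRECONDITION & SPEC =====
def Spec_possiblecombos (text : String) (out : Int) : Prop := out = possiblecombos_alt text
instance (text : String) (out : Int) : Decidable (Spec_possiblecombos text out) := by unfold Spec_possiblecombos; infer_instance

-- ===== CLAIM (what is proved, stated in full; the proofs are below) =====
def Claim_equal_possiblecombos : Prop := ∀ (text : String), Dom_possiblecombos text → Spec_possiblecombos text (possiblecombos text)

-- ===== LEMMAS AND PROOFS =====

theorem alpha_index (c : Char) (h1 : 'a' ≤ c) (h2 : c ≤ 'z') :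
    PySem.List.index? alphaArrPort c = some (c.toNat - 97) := by
  obtain ⟨n, h97, h122, rfl⟩ : ∃ n, 97 ≤ n ∧ n ≤ 122 ∧ c = Char.ofNat n :=
    ⟨c.toNat, h1, h2, (Char.ofNat_toNat c).symm⟩
  interval_cases n <;> decide

-- the two character loops build the same frequency list
theorem freq_eq (text : String) :
    letterfreqPort text =
      text.toList.foldl
        (fun freq ch =>
          if 'a' ≤ ch ∧ ch ≤ 'z' then
            PySem.List.pySetD freq ((ch.toNat : Int) - 97)
              (PySem.List.pyGetD freq ((ch.toNat : Int) - 97) 0 + 1)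
          else freq)
        (List.replicate 26 (0 : Int)) := by
  unfold letterfreqPort
  refine PySem.List.foldl_congr_mem _ _ _ _ ?_
  intro acc ch _
  by_cases h : 'a' ≤ ch ∧ ch ≤ 'z'
  · have hidx := alpha_index ch h.1 h.2
    have h97 : 97 ≤ ch.toNat := h.1
    have hcast : (((ch.toNat - 97 : Nat)) : Int) = (ch.toNat : Int) - 97 := by omega
    simp only [if_pos h, hidx, Option.getD_some, hcast]
  · simp only [if_neg h]

-- sum of an indicator over a nodup list
theorem sum_ite_single (p : Int → Bool) (x : Int) (d : List Int) (hd : d.Nodup) :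
    (d.map (fun v => if p v = true ∧ v = x then (1 : Int) else 0)).sum
      = if p x = true ∧ x ∈ d then 1 else 0 := by
  induction d with
  | nil => simp
  | cons a t ih =>
    rcases List.nodup_cons.mp hd with ⟨ha, ht⟩
    by_cases hax : a = x
    · subst hax
      simp only [List.map_cons, List.sum_cons, ih ht]
      by_cases hp : p a = true
      · simp [hp, ha]
      · simp [hp]
    · simp only [List.map_cons, List.sum_cons, ih ht]
      by_cases hx : p x = true ∧ x ∈ t
      · simp [hx, hax, Ne.symm hax]
      · by_cases hp : p x
        · simp [hax, hp, List.mem_cons] at hx ⊢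
          simp [hx, Ne.symm hax]
        · simp [hax, hp]

theorem sum_ite_count (d : List Int) (p : Int → Bool) (hd : d.Nodup) :
    ∀ m : List Int, (∀ x ∈ m, p x = true → x ∈ d) →
      (d.map (fun v => if p v = true then (m.count v : Int) else 0)).sum
        = (m.countP p : Int) := by
  intro m
  induction m with
  | nil => simp
  | cons x t ih =>
    intro hsub
    have hxd : p x = true → x ∈ d := hsub x (by simp)
    have ht : ∀ y ∈ t, p y = true → y ∈ d := fun y hy => hsub y (List.mem_cons_of_mem _ hy)
    have step : (fun v => if p v = true then ((x :: t).count v : Int) else 0)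
        = (fun v => (if p v = true then (t.count v : Int) else 0)
            + (if p v = true ∧ v = x then (1 : Int) else 0)) := by
      funext v
      by_cases hp : p v = true
      · by_cases hvx : v = x
        · subst hvx; simp [hp]
        · simp [hp, hvx, Ne.symm hvx]
      · simp [hp]
    rw [step, PySem.List.sum_map_add_int, ih ht, sum_ite_single p x d hd]
    by_cases hp : p x = true
    · simp [hp, hxd hp]
    · simp [hp]

theorem sum_filter_gt_one (l : List Int) :
    (l.filter (fun c => decide (c > 1))).sum
      = (l.map (fun c => if decide (c > 1) = true then c else 0)).sum := by
  induction l with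
  | nil => simp
  | cons x t ih =>
    simp only [List.filter_cons, List.map_cons, List.sum_cons]
    by_cases hx : decide (x > 1) = true
    · rw [if_pos hx, if_pos hx, List.sum_cons, ih]
    · rw [if_neg hx, if_neg hx, ih, Int.zero_add]

theorem lemB (freq : List Int) :
    ((freq.foldl
        (fun counts f => if f ≠ 0 then counts.insert f (counts.getD f 0 + 1) else counts)
        (PySem.Dict.empty)).values.filter (fun c => decide (c > 1))).sum
      = (List.countP (fun x => decide (1 < List.count x (freq.filter (fun f => decide (f ≠ 0)))))
          (freq.filter (fun f => decide (f ≠ 0))) : Int) := by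
  have hstep : (fun (counts : PySem.Dict Int Int) f =>
        if f ≠ 0 then counts.insert f (counts.getD f 0 + 1) else counts)
      = (fun counts f => if f ≠ 0 then counts.modify f 0 (· + 1) else counts) := rfl
  rw [hstep, PySem.List.foldl_ite_eq_foldl_filter (p := fun f : Int => f ≠ 0),
      ← PySem.Dict.counter_eq_foldl]
  set m := freq.filter (fun f => decide (f ≠ 0)) with hm
  have hvals : (PySem.Dict.counter m).values
      = (PySem.Set.ofList m).map (fun k => (List.count k m : Int)) := by
    show (PySem.Dict.counter m).items.map (·.2) = _
    rw [PySem.Dict.items_counter, List.map_map]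
    rfl
  rw [hvals, sum_filter_gt_one, List.map_map]
  have : ((fun c => if decide (c > 1) = true then c else 0) ∘ fun k => (List.count k m : Int))
      = fun v => if (fun x => decide (1 < List.count x m)) v = true then ((List.count v m : Nat) : Int) else 0 := by
    funext v
    simp [Function.comp]
  rw [this]
  exact sum_ite_count (PySem.Set.ofList m) _ (PySem.Set.nodup_ofList m) m
    (fun x hx _ => (PySem.Set.mem_ofList m x).mpr hx)

theorem foldl_count_helper (p : Int → Prop) [DecidablePred p] :
    ∀ (l : List Int) (a : Int),
      List.foldl (fun c y => if p y then c + 1 else c) a l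
        = a + (List.countP (fun y => decide (p y)) l : Int) := by
  intro l
  induction l with
  | nil => intro a; simp
  | cons y t ih =>
    intro a
    by_cases hy : p y
    · simp only [List.foldl_cons, if_pos hy, ih, List.countP_cons, decide_eq_true hy]
      push_cast
      ring
    · simp only [List.foldl_cons, if_neg hy, ih, List.countP_cons, decide_eq_false hy]
      push_cast
      ring

theorem lemA (freq : List Int) :
    (PySem.List.pyRange 0 (freq.length : Int) 1).foldl
      (fun pos i =>
        if ((PySem.List.pyRange 0 (freq.length : Int) 1).foldl
              (fun counter j =>
                if PySem.List.pyGetD freq i 0 = PySem.List.pyGetD freq j 0 ∧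
                   PySem.List.pyGetD freq i 0 ≠ 0
                then counter + 1 else counter) (0 : Int)) > 1
        then pos + 1 else pos) 0
      = (freq.countP (fun x => decide (x ≠ 0 ∧ 1 < freq.count x)) : Int) := by
  rw [PySem.List.foldl_pyRange_zero_pyGetD' freq 0
        (f := fun pos x =>
          if ((PySem.List.pyRange 0 (freq.length : Int) 1).foldl
                (fun counter j =>
                  if x = PySem.List.pyGetD freq j 0 ∧ x ≠ 0
                  then counter + 1 else counter) (0 : Int)) > 1
          then pos + 1 else pos) 0]
  rw [PySem.List.foldl_congr_mem freq _
        (fun pos x => if x ≠ 0 ∧ 1 < freq.count x then pos + 1 else pos) 0 ?_]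
  · have hfold : List.foldl (fun pos x => if x ≠ 0 ∧ 1 < freq.count x then pos + 1 else pos) 0 freq
        = 0 + (List.countP (fun x => decide (x ≠ 0 ∧ 1 < freq.count x)) freq : Int) :=
      foldl_count_helper (fun x : Int => x ≠ 0 ∧ 1 < freq.count x) freq 0
    rw [hfold, Int.zero_add]
  · intro pos x hx
    show _ = if x ≠ 0 ∧ 1 < List.count x freq then pos + 1 else pos
    rw [PySem.List.foldl_pyRange_zero_pyGetD' freq 0
          (f := fun counter y => if x = y ∧ x ≠ 0 then counter + 1 else counter) 0]
    have hfold : List.foldl (fun counter y => if x = y ∧ x ≠ 0 then counter + 1 else counter) 0 freq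
        = 0 + (List.countP (fun y => decide (x = y ∧ x ≠ 0)) freq : Int) :=
      foldl_count_helper (fun y : Int => x = y ∧ x ≠ 0) freq 0
    rw [hfold, Int.zero_add]
    by_cases h0 : x = 0
    · subst h0
      have hz : (fun y => decide ((0:Int) = y ∧ (0:Int) ≠ 0)) = fun _ => false := by
        funext y; simp
      rw [hz, List.countP_false]
      norm_num
    · have hc : List.countP (fun y => decide (x = y ∧ x ≠ 0)) freq = freq.count x := by
        rw [List.count]
        refine List.countP_congr ?_
        intro y hy
        by_cases hxy : x = y
        · subst hxy; simp [h0]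
        · simp [hxy, Ne.symm hxy]
      rw [hc]
      by_cases h1 : 1 < freq.count x
      · rw [if_pos (by exact_mod_cast h1), if_pos ⟨h0, h1⟩]
      · rw [if_neg (by exact_mod_cast h1), if_neg (by simp [h0, h1])]

theorem bridge (freq : List Int) :
    (freq.countP (fun x => decide (x ≠ 0 ∧ 1 < freq.count x)))
      = List.countP (fun x => decide (1 < List.count x (freq.filter (fun f => decide (f ≠ 0)))))
          (freq.filter (fun f => decide (f ≠ 0))) := by
  rw [List.countP_filter]
  refine List.countP_congr ?_
  intro x hx
  by_cases h0 : x = 0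
  · subst h0; simp
  · have : List.count x (freq.filter (fun f => decide (f ≠ 0))) = freq.count x :=
      List.count_filter (by simp [h0])
    simp [h0]

-- ===== VERDICT (by name: the statement is the Claim_ definition above) =====
theorem possiblecombos_spec : Claim_equal_possiblecombos := by
  intro text _
  simp only [Spec_possiblecombos, possiblecombos, possiblecombos_alt]
  rw [← freq_eq text]
  rw [lemA (letterfreqPort text), lemB (letterfreqPort text)]
  exact_mod_cast congrArg (fun n : Nat => (n : Int)) (bridge (letterfreqPort text))
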